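-- pv_equiv track=rewrite | github.com/andyp714/String-Functions- | String_Functions_Final.py | last_name
-- ===== SOURCE A (Python) =====
-- def last_name(word):
--     '''
--     This function is designed to only take the last name
--     :param word: user input
--     :type name: string
--     :type state:
--     :returns: The last name as a string
--     :raises:
--     '''
--     space_counter = 0
--     name_last = ''
--     for letter in word:
--         if letter == ' ':
--             space_counter = space_counter +1
--         if space_counter == 2:                                                                                      #Starts counting the lastname after two spaces
--             name_last = name_last + letter
--
--     return name_last
-- ===== SOURCE B (Python) =====
-- def last_name(word):
--     parts = word.split(' ')
--     return ' ' + parts[2] if len(parts) > 2 else ''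
-- ===== Notes on version B (the rewrite author's own statement) =====
-- stated objective: simpler
-- what changed: Replaces the character-by-character space-counting loop with a single split on the space character and one indexed lookup of the third field, re-prefixing the separating space.
import Mathlib
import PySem

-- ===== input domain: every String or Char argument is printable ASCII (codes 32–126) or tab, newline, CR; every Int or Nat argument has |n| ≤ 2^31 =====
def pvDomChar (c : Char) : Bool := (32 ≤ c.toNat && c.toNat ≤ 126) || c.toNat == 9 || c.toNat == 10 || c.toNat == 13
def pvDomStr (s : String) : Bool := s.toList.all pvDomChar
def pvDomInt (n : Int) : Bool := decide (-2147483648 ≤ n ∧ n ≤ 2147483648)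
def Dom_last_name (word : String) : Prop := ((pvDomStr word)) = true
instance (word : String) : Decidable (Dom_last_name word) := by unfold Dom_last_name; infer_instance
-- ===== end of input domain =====

-- B changes: one split(' ') and an indexed lookup of the third field (re-prefixing the
-- second space) instead of A's per-character space-counting loop; objective: simpler.

-- ===== PORT A =====
-- A's for-loop, with its two state variables space_counter / name_last (as a char list)
def lastNameGo : List Char → Nat → List Char → List Char
  | [], _, acc => acc
  | c :: rest, sc, acc =>
    let sc' := if c = ' ' then sc + 1 else sc
    let acc' := if sc' = 2 then acc ++ [c] else acc
    lastNameGo rest sc' acc'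

def last_name (word : String) : String :=
  String.ofList (lastNameGo word.toList 0 [])

-- ===== PORT B =====
def last_name_alt (word : String) : String :=
  match PySem.Str.split? word " " with
  | some parts => if 2 < parts.length then " " ++ parts.getD 2 "" else ""
  | none => ""   -- unreachable: the separator " " is nonempty

-- ===== PRECONDITION & SPEC =====
def Spec_last_name (word : String) (out : String) : Prop := out = last_name_alt word
instance (word : String) (out : String) : Decidable (Spec_last_name word out) := by unfold Spec_last_name; infer_instance

-- ===== CLAIM (what is proved, stated in full; the proofs are below) =====
def Claim_equal_last_name : Prop := ∀ (word : String), Dom_last_name word → Spec_last_name word (last_name word)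

-- ===== LEMMAS AND PROOFS =====

-- recursive characterization of PySem.Chars.splitOn for the single-char separator [' ']
def splitAux : List Char → List Char → List (List Char)
  | [], cur => [cur.reverse]
  | c :: rest, cur => if c = ' ' then cur.reverse :: splitAux rest [] else splitAux rest (c :: cur)

theorem splitOn_go_eq (fuel : Nat) : ∀ (l cur : List Char) (acc : List (List Char)),
    l.length < fuel →
    PySem.Chars.splitOn.go [' '] fuel l cur acc = acc.reverse ++ splitAux l cur := by
  induction fuel with
  | zero => intro l cur acc h; omega
  | succ n ih =>
    intro l cur acc h
    cases l with
    | nil => simp [PySem.Chars.splitOn.go, splitAux]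
    | cons c rest =>
      simp only [PySem.Chars.splitOn.go]
      by_cases hc : c = ' '
      · subst hc
        rw [if_pos (show List.isPrefixOf [' '] (' ' :: rest) = true by
          simp [List.isPrefixOf])]
        show PySem.Chars.splitOn.go [' '] n rest [] (cur.reverse :: acc) =
          acc.reverse ++ splitAux (' ' :: rest) cur
        rw [ih rest [] ((cur.reverse :: acc)) (by simp at h ⊢; omega)]
        simp [splitAux]
      · rw [if_neg (by simp [List.isPrefixOf]; exact fun hc' => hc hc'.symm)]
        rw [ih rest (c :: cur) acc (by simp at h ⊢; omega)]
        simp [splitAux, hc]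

theorem splitOn_eq (l : List Char) : PySem.Chars.splitOn l [' '] = splitAux l [] := by
  unfold PySem.Chars.splitOn
  simpa using splitOn_go_eq (l.length + 1) l [] [] (Nat.lt_succ_self _)

-- structure of splitAux: head is the current piece up to the next space
theorem splitAux_eq (l : List Char) : ∀ cur, splitAux l cur =
    (cur.reverse ++ l.takeWhile (· ≠ ' ')) ::
      (match l.dropWhile (· ≠ ' ') with
       | [] => []
       | _ :: t => splitAux t []) := by
  induction l with
  | nil => intro cur; simp [splitAux]
  | cons c rest ih =>
    intro cur
    by_cases hc : c = ' '
    · subst hc; simp [splitAux, List.takeWhile, List.dropWhile]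
    · simp only [splitAux, if_neg hc]
      rw [ih (c :: cur)]
      simp [List.takeWhile, List.dropWhile, hc]

-- characterization of A's loop, by the value of space_counter
theorem lastNameGo_ge3 (l : List Char) : ∀ (n : Nat) (acc : List Char),
    lastNameGo l (n + 3) acc = acc := by
  induction l with
  | nil => intro n acc; rfl
  | cons c rest ih =>
    intro n acc
    by_cases hc : c = ' '
    · have h4 : n + 3 + 1 = (n + 1) + 3 := by omega
      simp only [lastNameGo, if_pos hc, h4, if_neg (show ¬((n + 1) + 3 = 2) by omega)]
      exact ih (n + 1) acc
    · simp only [lastNameGo, if_neg hc, if_neg (show ¬(n + 3 = 2) by omega)]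
      exact ih n acc

theorem lastNameGo_two (l : List Char) : ∀ acc,
    lastNameGo l 2 acc = acc ++ l.takeWhile (· ≠ ' ') := by
  induction l with
  | nil => intro acc; simp [lastNameGo]
  | cons c rest ih =>
    intro acc
    by_cases hc : c = ' '
    · simp only [lastNameGo, if_pos hc, if_neg (show ¬(2 + 1 = 2) by omega)]
      rw [show (2 + 1 = 0 + 3) by omega, lastNameGo_ge3]
      simp [List.takeWhile, hc]
    · rw [show lastNameGo (c :: rest) 2 acc = lastNameGo rest 2 (acc ++ [c]) from by
        simp [lastNameGo, hc]]
      rw [ih (acc ++ [c])]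
      simp [List.takeWhile, hc]

theorem lastNameGo_one (l : List Char) : ∀ acc,
    lastNameGo l 1 acc =
      (match l.dropWhile (· ≠ ' ') with
       | [] => acc
       | _ :: t => lastNameGo t 2 (acc ++ [' '])) := by
  induction l with
  | nil => intro acc; rfl
  | cons c rest ih =>
    intro acc
    by_cases hc : c = ' '
    · subst hc
      simp [lastNameGo, List.dropWhile]
    · rw [show lastNameGo (c :: rest) 1 acc = lastNameGo rest 1 acc from by
        simp [lastNameGo, hc]]
      rw [ih acc]; simp [List.dropWhile, hc]

theorem lastNameGo_zero (l : List Char) : ∀ acc,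
    lastNameGo l 0 acc =
      (match l.dropWhile (· ≠ ' ') with
       | [] => acc
       | _ :: t => lastNameGo t 1 acc) := by
  induction l with
  | nil => intro acc; rfl
  | cons c rest ih =>
    intro acc
    by_cases hc : c = ' '
    · subst hc
      simp [lastNameGo, List.dropWhile]
    · rw [show lastNameGo (c :: rest) 0 acc = lastNameGo rest 0 acc from by
        simp [lastNameGo, hc]]
      rw [ih acc]; simp [List.dropWhile, hc]

-- the two char-level computations agree
theorem main_chars (l : List Char) :
    lastNameGo l 0 [] =
      (let parts := splitAux l []
       if 2 < parts.length then ' ' :: parts.getD 2 [] else []) := by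
  rw [lastNameGo_zero, splitAux_eq]
  cases h0 : l.dropWhile (· ≠ ' ') with
  | nil => simp
  | cons a t1 =>
    dsimp only
    rw [lastNameGo_one, splitAux_eq]
    cases h1 : t1.dropWhile (· ≠ ' ') with
    | nil => simp
    | cons b t2 =>
      dsimp only
      rw [lastNameGo_two]
      simp only [splitAux_eq t2]
      simp

-- ===== VERDICT (by name: the statement is the Claim_ definition above) =====
theorem last_name_spec : Claim_equal_last_name := by
  intro word _
  unfold Spec_last_name last_name last_name_alt
  have hsplit : PySem.Str.split? word " " =
      some ((PySem.Chars.splitOn word.toList [' ']).map String.ofList) := by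
    simp [PySem.Str.split?, PySem.Chars.split?]
  rw [hsplit]
  rw [splitOn_eq, main_chars]
  simp only [List.length_map]
  by_cases h : 2 < (splitAux word.toList []).length
  · simp only [if_pos h]
    have hmap : (List.map String.ofList (splitAux word.toList [])).getD 2 "" =
        String.ofList ((splitAux word.toList []).getD 2 []) := by
      simp only [List.getD_eq_getElem?_getD, List.getElem?_map]
      cases (splitAux word.toList [])[2]? <;> simp
    rw [hmap, show (" " = String.ofList [' ']) from rfl, ← String.ofList_append]
    rfl
  · simp [if_neg h]
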